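-- pv_equiv track=rewrite | github.com/unilep/algorithm | codility/MaxCounters.py | solution
-- ===== SOURCE A (Python) =====
-- def solution(N, A):
--     # write your code in Python 3.6
--     items = [0] * N
--     mx = 0
--     check_mx = 0
--     for i, item in enumerate(A):
--         item -= 1
--         if item == N:
--             check_mx = mx
--         else:
--             if items[item] < check_mx:
--                 items[item] = check_mx + 1
--             else:
--                 items[item] += 1
--             mx = max(mx, items[item])
--     for i, item in enumerate(items):
--         if item < check_mx:
--             items[i] = check_mx
--     return items
-- ===== SOURCE B (Python) =====
-- def solution(N, A):
--     items = [0] * N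
--     max_counter = 0
--     for a in A:
--         if a == N + 1:
--             for i in range(N):
--                 items[i] = max_counter
--         else:
--             items[a - 1] += 1
--             if items[a - 1] > max_counter:
--                 max_counter = items[a - 1]
--     return items
-- ===== Notes on version B (the rewrite author's own statement) =====
-- stated objective: simpler
-- what changed: Replaces A's lazy max-all (deferred check_mx baseline plus a final fix-up pass over all counters) with the naive eager MaxCounters that performs every max-all operation as an actual full scan setting each counter to the running maximum.
import Mathlib
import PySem

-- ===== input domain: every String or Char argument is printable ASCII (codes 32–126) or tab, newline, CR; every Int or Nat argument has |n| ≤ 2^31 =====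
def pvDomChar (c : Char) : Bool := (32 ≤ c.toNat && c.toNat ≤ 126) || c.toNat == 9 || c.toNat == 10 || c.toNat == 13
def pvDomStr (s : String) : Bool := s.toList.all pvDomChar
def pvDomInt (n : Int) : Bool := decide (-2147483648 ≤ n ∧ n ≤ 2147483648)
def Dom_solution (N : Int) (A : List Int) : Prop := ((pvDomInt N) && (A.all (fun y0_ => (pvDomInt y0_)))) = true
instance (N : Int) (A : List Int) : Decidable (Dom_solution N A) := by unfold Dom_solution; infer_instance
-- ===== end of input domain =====

-- B replaces A's lazy check_mx baseline + final fix-up pass by the naive eager MaxCounters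
-- that performs every max-all operation as a full scan (objective: simpler; not faster).

-- ===== PORT A =====
-- body of A's main loop: item -= 1; lazy max-all via check_mx, else increment with deferred baseline
def stepA (N : Int) (st : List Int × Int × Int) (item0 : Int) : List Int × Int × Int :=
  let items := st.1
  let mx := st.2.1
  let check_mx := st.2.2
  let item := item0 - 1
  if item = N then (items, mx, mx)
  else
    let items :=
      if PySem.List.pyGetD items item 0 < check_mx then
        PySem.List.pySetD items item (check_mx + 1)
      else
        PySem.List.pySetD items item (PySem.List.pyGetD items item 0 + 1)
    (items, max mx (PySem.List.pyGetD items item 0), check_mx)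

-- body of A's final fix-up loop: if item < check_mx: items[i] = check_mx
def fixA (check_mx : Int) (items : List Int) (p : Int × Int) : List Int :=
  if p.2 < check_mx then PySem.List.pySetD items p.1 check_mx else items

def solution (N : Int) (A : List Int) : List Int :=
  let st := (PySem.List.enumerate A 0).foldl (fun st p => stepA N st p.2)
    (List.replicate N.toNat 0, 0, 0)
  (PySem.List.enumerate st.1 0).foldl (fixA st.2.2) st.1

-- ===== PORT B =====
-- body of B's loop: max-all op performs a real full scan, otherwise increment and bump max_counter
def stepB (N : Int) (st : List Int × Int) (a : Int) : List Int × Int :=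
  let items := st.1
  let max_counter := st.2
  if a = N + 1 then
    ((PySem.List.pyRange 0 N 1).foldl
      (fun its i => PySem.List.pySetD its i max_counter) items, max_counter)
  else
    let items := PySem.List.pySetD items (a - 1) (PySem.List.pyGetD items (a - 1) 0 + 1)
    if max_counter < PySem.List.pyGetD items (a - 1) 0 then
      (items, PySem.List.pyGetD items (a - 1) 0)
    else (items, max_counter)

def solution_alt (N : Int) (A : List Int) : List Int :=
  (A.foldl (stepB N) (List.replicate N.toNat 0, 0)).1

-- ===== PRECONDITION & SPEC =====
-- Pre_ excludes exactly the inputs on which A raises IndexError: an operation a that is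
-- neither the max-all code N+1 nor a Python-valid (possibly negative) index a-1 into the N counters.
def Pre_solution (N : Int) (A : List Int) : Prop :=
  ∀ a ∈ A, a = N + 1 ∨ (0 < N ∧ 1 - N ≤ a ∧ a ≤ N)
instance (N : Int) (A : List Int) : Decidable (Pre_solution N A) := by
  unfold Pre_solution; infer_instance
def pvWitness_solution : Int × List Int := (5, [3, 4, 4, 6, 1, 4, 4])
def Spec_solution (N : Int) (A : List Int) (out : List Int) : Prop := out = solution_alt N A
instance (N : Int) (A : List Int) (out : List Int) : Decidable (Spec_solution N A out) := by
  unfold Spec_solution; infer_instance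

-- ===== CLAIM (what is proved, stated in full; the proofs are below) =====
def Claim_equal_solution : Prop := ∀ (N : Int) (A : List Int), Dom_solution N A → Pre_solution N A → Spec_solution N A (solution N A)

-- ===== LEMMAS AND PROOFS =====

-- Python's index normalisation for a possibly negative in-range index
def wrapIdx (n : Nat) (i : Int) : Nat := if i < 0 then (i + n).toNat else i.toNat

theorem wrapIdx_lt (n : Nat) (i : Int) (h1 : -(n : Int) ≤ i) (h2 : i < n) :
    wrapIdx n i < n := by unfold wrapIdx; split <;> omega

theorem pyGetD_wrap (xs : List Int) (i d : Int) (h1 : -(xs.length : Int) ≤ i)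
    (h2 : i < xs.length) :
    PySem.List.pyGetD xs i d = xs.getD (wrapIdx xs.length i) d := by
  unfold wrapIdx
  by_cases hneg : i < 0
  · simp only [PySem.List.pyGetD, PySem.List.pyGet?, PySem.List.pyIdx?, not_le.2 hneg,
      if_false, if_pos h1, hneg, if_true]
    have : xs.length - (-i).toNat = (i + xs.length).toNat := by omega
    simp [this, List.getD]
  · have h0 : 0 ≤ i := by omega
    simp only [PySem.List.pyGetD, PySem.List.pyGet?, PySem.List.pyIdx?, if_pos h0,
      if_pos h2, hneg, if_false]
    simp [List.getD]

theorem pySetD_wrap (xs : List Int) (i v : Int) (h1 : -(xs.length : Int) ≤ i)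
    (h2 : i < xs.length) :
    PySem.List.pySetD xs i v = xs.set (wrapIdx xs.length i) v := by
  unfold wrapIdx
  by_cases hneg : i < 0
  · simp only [PySem.List.pySetD, PySem.List.pySet?, PySem.List.pyIdx?, not_le.2 hneg,
      if_false, if_pos h1, hneg, if_true]
    have : xs.length - (-i).toNat = (i + xs.length).toNat := by omega
    simp [this]
  · have h0 : 0 ≤ i := by omega
    simp only [PySem.List.pySetD, PySem.List.pySet?, PySem.List.pyIdx?, if_pos h0,
      if_pos h2, hneg, if_false]
    simp

-- the loop invariant tying A's lazy state (L, mx, c) to B's eager state (E, m)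
def LoopInv (N : Int) (L E : List Int) (mx c m : Int) : Prop :=
  L.length = N.toNat ∧ E.length = N.toNat ∧ m = mx ∧ c ≤ mx ∧
  ∀ j < N.toNat, L.getD j 0 ≤ mx ∧ E.getD j 0 = max (L.getD j 0) c

theorem foldl_range_set (m : Int) : ∀ (n : Nat) (E : List Int), n ≤ E.length →
    (List.range n).foldl (fun its k => its.set k m) E = List.replicate n m ++ E.drop n := by
  intro n
  induction n with
  | zero => intro E _; simp
  | succ n ih =>
    intro E h
    rw [List.range_succ, List.foldl_append, ih E (by omega)]
    rw [List.drop_eq_getElem_cons (by omega)]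
    simp only [List.foldl_cons, List.foldl_nil]
    rw [List.set_append, if_neg (by simp)]
    simp only [List.length_replicate, Nat.sub_self, List.set_cons_zero]
    rw [List.replicate_succ']
    simp

theorem setall (N : Int) (m : Int) (E : List Int) (h : E.length = N.toNat) :
    (PySem.List.pyRange 0 N 1).foldl (fun its i => PySem.List.pySetD its i m) E
      = List.replicate N.toNat m := by
  rw [PySem.List.pyRange_one, List.foldl_map]
  simp only [zero_add, PySem.List.pySetD_natCast]
  rw [show (N - 0).toNat = N.toNat by omega, foldl_range_set m N.toNat E (by omega)]
  simp [h]

theorem step_inv (N a : Int) (L E : List Int) (mx c m : Int)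
    (ha : a = N + 1 ∨ (0 < N ∧ 1 - N ≤ a ∧ a ≤ N)) (h : LoopInv N L E mx c m) :
    LoopInv N (stepA N (L, mx, c) a).1 (stepB N (E, m) a).1
      (stepA N (L, mx, c) a).2.1 (stepA N (L, mx, c) a).2.2 (stepB N (E, m) a).2 := by
  obtain ⟨hL, hE, hm, hc, hj⟩ := h
  rcases ha with ha | ⟨hN, ha1, ha2⟩
  · -- max-all operation
    subst ha
    simp only [stepA, stepB, if_pos (show N + 1 - 1 = N by ring),
      if_true]
    refine ⟨hL, ?_, by omega, le_refl _, ?_⟩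
    · rw [setall N m E hE]; simp
    · intro j hjn
      rw [setall N m E hE]
      have hrep : (List.replicate N.toNat m).getD j 0 = m := by
        rw [List.getD_eq_getElem _ _ (by simpa using hjn)]; simp
      have := (hj j hjn).1
      exact ⟨this, by rw [hrep]; omega⟩
  · -- increment operation at (possibly negative, Python-wrapping) index a - 1
    have hiN : a - 1 ≠ N := by omega
    have hbL1 : -(L.length : Int) ≤ a - 1 := by rw [hL]; omega
    have hbL2 : a - 1 < (L.length : Int) := by rw [hL]; omega
    have hbE1 : -(E.length : Int) ≤ a - 1 := by rw [hE]; omega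
    have hbE2 : a - 1 < (E.length : Int) := by rw [hE]; omega
    set j := wrapIdx N.toNat (a - 1) with hjdef
    have hjlt : j < N.toNat := wrapIdx_lt N.toNat (a - 1) (by omega) (by omega)
    have hwL : wrapIdx L.length (a - 1) = j := by rw [hL]
    have hwE : wrapIdx E.length (a - 1) = j := by rw [hE]
    have hja : a ≠ N + 1 := by omega
    have hjL : j < L.length := by omega
    have hjE : j < E.length := by omega
    have hLv := (hj j hjlt).1
    have hEv := (hj j hjlt).2
    have hgetL : PySem.List.pyGetD L (a - 1) 0 = L.getD j 0 := by
      rw [pyGetD_wrap L _ 0 hbL1 hbL2, hwL]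
    have hgetE : PySem.List.pyGetD E (a - 1) 0 = E.getD j 0 := by
      rw [pyGetD_wrap E _ 0 hbE1 hbE2, hwE]
    simp only [stepA, stepB, if_neg hiN, if_neg hja]
    set v : Int := max (L.getD j 0) c + 1 with hv
    have hsetL : (if PySem.List.pyGetD L (a - 1) 0 < c then
        PySem.List.pySetD L (a - 1) (c + 1)
      else PySem.List.pySetD L (a - 1) (PySem.List.pyGetD L (a - 1) 0 + 1)) = L.set j v := by
      rw [hgetL]
      split
      · rw [pySetD_wrap L _ _ hbL1 hbL2, hwL]; congr 1; omega
      · rw [pySetD_wrap L _ _ hbL1 hbL2, hwL]; congr 1; omega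
    have hsetE : PySem.List.pySetD E (a - 1) (PySem.List.pyGetD E (a - 1) 0 + 1)
        = E.set j v := by
      rw [hgetE, pySetD_wrap E _ _ hbE1 hbE2, hwE]; congr 1; omega
    have hgetL' : PySem.List.pyGetD (L.set j v) (a - 1) 0 = v := by
      rw [pyGetD_wrap _ _ 0 (by simpa using hbL1) (by simpa using hbL2)]
      simp only [List.length_set, hwL]
      rw [List.getD_eq_getElem _ _ (by simpa using hjL)]
      simp [List.getElem_set_self]
    have hgetE' : PySem.List.pyGetD (E.set j v) (a - 1) 0 = v := by
      rw [pyGetD_wrap _ _ 0 (by simpa using hbE1) (by simpa using hbE2)]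
      simp only [List.length_set, hwE]
      rw [List.getD_eq_getElem _ _ (by simpa using hjE)]
      simp [List.getElem_set_self]
    simp only [hsetL, hsetE, hgetL', hgetE']
    have hif : (if m < v then (E.set j v, v) else (E.set j v, m)) = (E.set j v, max mx v) := by
      subst hm
      split
      · rw [Prod.mk.injEq]; exact ⟨rfl, by omega⟩
      · rw [Prod.mk.injEq]; exact ⟨rfl, by omega⟩
    rw [hif]
    refine ⟨by simpa using hL, by simpa using hE, rfl, by omega, ?_⟩
    intro k hk
    by_cases hkj : k = j
    · rw [hkj]
      have hLk : (L.set j v).getD j 0 = v := by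
        rw [List.getD_eq_getElem _ _ (by simpa using hjL)]
        simp [List.getElem_set_self]
      have hEk : (E.set j v).getD j 0 = v := by
        rw [List.getD_eq_getElem _ _ (by simpa using hjE)]
        simp [List.getElem_set_self]
      rw [hLk, hEk]
      exact ⟨by omega, by omega⟩
    · have hne : j ≠ k := fun hh => hkj hh.symm
      have h1 : (L.set j v).getD k 0 = L.getD k 0 := by
        simp [List.getD, List.getElem?_set_ne hne]
      have h2 : (E.set j v).getD k 0 = E.getD k 0 := by
        simp [List.getD, List.getElem?_set_ne hne]
      have := hj k hk
      rw [h1, h2]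
      exact ⟨by omega, this.2⟩

theorem loop_inv (N : Int) : ∀ (A : List Int),
    (∀ a ∈ A, a = N + 1 ∨ (0 < N ∧ 1 - N ≤ a ∧ a ≤ N)) →
    ∀ L E mx c m, LoopInv N L E mx c m →
    LoopInv N (A.foldl (stepA N) (L, mx, c)).1 (A.foldl (stepB N) (E, m)).1
      (A.foldl (stepA N) (L, mx, c)).2.1 (A.foldl (stepA N) (L, mx, c)).2.2
      (A.foldl (stepB N) (E, m)).2 := by
  intro A
  induction A with
  | nil => intro _ L E mx c m h; simpa using h
  | cons a A ih =>
    intro hpre L E mx c m h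
    have hstep := step_inv N a L E mx c m (hpre a (by simp)) h
    have := ih (fun b hb => hpre b (by simp [hb]))
      (stepA N (L, mx, c) a).1 (stepB N (E, m) a).1
      (stepA N (L, mx, c) a).2.1 (stepA N (L, mx, c) a).2.2 (stepB N (E, m) a).2 hstep
    simpa using this

-- a foldl over enumerate whose body ignores the index is a foldl over the list
theorem foldl_enumerate_snd {β : Type} (g : β → Int → β) :
    ∀ (xs : List Int) (s : Int) (init : β),
    (PySem.List.enumerate xs s).foldl (fun st p => g st p.2) init = xs.foldl g init := by
  intro xs
  induction xs with
  | nil => intro s init; simp [PySem.List.enumerate_nil]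
  | cons x xs ih => intro s init; rw [PySem.List.enumerate_cons]; simp [ih]

-- A's final fix-up loop (write at the current index only) is a pointwise map
theorem fixup (c : Int) : ∀ (suf pre : List Int),
    (PySem.List.enumerate suf (pre.length : Int)).foldl (fixA c) (pre ++ suf)
      = pre ++ suf.map (fun v => if v < c then c else v) := by
  intro suf
  induction suf with
  | nil => intro pre; simp [PySem.List.enumerate_nil]
  | cons v suf ih =>
    intro pre
    rw [PySem.List.enumerate_cons, List.foldl_cons]
    have hstep : fixA c (pre ++ v :: suf) ((pre.length : Int), v)
        = pre ++ (if v < c then c else v) :: suf := by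
      unfold fixA
      simp only [PySem.List.pySetD_natCast]
      split
      · rw [List.set_append]; simp
      · rfl
    rw [hstep]
    have hlen : (pre.length : Int) + 1 = ((pre ++ [if v < c then c else v]).length : Int) := by
      simp
    rw [hlen, show pre ++ (if v < c then c else v) :: suf
        = (pre ++ [if v < c then c else v]) ++ suf by simp, ih]
    simp

theorem solution_eq (N : Int) (A : List Int) (hpre : Pre_solution N A) :
    solution N A = solution_alt N A := by
  unfold solution solution_alt
  rw [foldl_enumerate_snd (stepA N) A 0 (List.replicate N.toNat 0, 0, 0)]
  have hInv0 : LoopInv N (List.replicate N.toNat 0) (List.replicate N.toNat 0) 0 0 0 := by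
    refine ⟨by simp, by simp, rfl, le_refl _, ?_⟩
    intro j hj
    rw [List.getD_eq_getElem _ _ (by simpa using hj)]
    simp
  have hinv := loop_inv N A hpre (List.replicate N.toNat 0) (List.replicate N.toNat 0)
    0 0 0 hInv0
  set stA := A.foldl (stepA N) (List.replicate N.toNat 0, 0, 0) with hstA
  set stB := A.foldl (stepB N) (List.replicate N.toNat 0, 0) with hstB
  obtain ⟨hL, hE, hm, hc, hj⟩ := hinv
  have hfix := fixup stA.2.2 stA.1 []
  simp only [List.length_nil, Int.natCast_zero, List.nil_append] at hfix
  rw [hfix]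
  apply List.ext_getElem
  · simp [hL, hE]
  · intro k h1 h2
    simp only [List.length_map] at h1
    have hk : k < N.toNat := by omega
    have := (hj k hk).2
    rw [List.getD_eq_getElem _ _ (by omega), List.getD_eq_getElem _ _ (by omega)] at this
    simp only [List.getElem_map, this]
    omega

-- ===== VERDICT (by name: the statement is the Claim_ definition above) =====
theorem solution_spec : Claim_equal_solution := by
  intro N A _ hpre
  unfold Spec_solution
  exact solution_eq N A hpre
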